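-- pv_equiv track=rewrite | github.com/MagaliSoto/RetailMapper_V.2 | app/services/process_planogram_pipeline.py | build_structured_groups
-- ===== SOURCE A (Python) =====
-- from typing import Dict, List, Tuple, Any
--
-- def build_structured_groups(
--     products: List[Dict],
--     grouped_ids: Dict[str, List[int]]
-- ) -> Dict[str, Dict[str, List[int]]]:
--     """
--     Build structured output including spatial metadata.
--
--     Parameters
--     ----------
--     products : List[Dict]
--         Detected products with spatial metadata.
--     grouped_ids : Dict[str, List[int]]
--         label → product IDs.
--
--     Returns
--     -------
--     Dict[str, Dict[str, List[int]]]
--         label → {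
--             "ids": List[int],
--             "row": List[int],
--             "col": List[int],
--             "subrow": List[int]
--         }
--     """
--
--     id_to_product = {p["id"]: p for p in products}
--
--     structured_output: Dict[str, Dict[str, List[int]]] = {}
--
--     for label, ids in grouped_ids.items():
--
--         rows = set()
--         cols = set()
--         subrows = set()
--
--         for pid in ids:
--             product = id_to_product.get(pid)
--             if not product:
--                 continue
--
--             if "row" in product:
--                 rows.add(product["row"])
--
--             if "col" in product:
--                 cols.add(product["col"])
--
--             if "subrow" in product:
--                 subrows.add(product["subrow"])
--
--         structured_output[label] = {
--             "ids": ids,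
--             "row": sorted(rows),
--             "col": sorted(cols),
--             "subrow": sorted(subrows)
--         }
--
--     return structured_output
-- ===== SOURCE B (Python) =====
-- def build_structured_groups(products, grouped_ids):
--     def gather(ids, field):
--         return sorted({p[field] for p in products if p["id"] in ids and field in p})
--     return {
--         label: {
--             "ids": ids,
--             "row": gather(ids, "row"),
--             "col": gather(ids, "col"),
--             "subrow": gather(ids, "subrow"),
--         }
--         for label, ids in grouped_ids.items()
--     }
-- ===== Notes on version B (the rewrite author's own statement) =====
-- stated objective: simpler
-- what changed: B drops A's id-to-product hash index, mutable per-label set objects and per-id pull loop, and instead builds each label entry with one product-major set comprehension per field (filter products whose id is in the label's ids) that is sorted directly.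
import Mathlib
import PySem

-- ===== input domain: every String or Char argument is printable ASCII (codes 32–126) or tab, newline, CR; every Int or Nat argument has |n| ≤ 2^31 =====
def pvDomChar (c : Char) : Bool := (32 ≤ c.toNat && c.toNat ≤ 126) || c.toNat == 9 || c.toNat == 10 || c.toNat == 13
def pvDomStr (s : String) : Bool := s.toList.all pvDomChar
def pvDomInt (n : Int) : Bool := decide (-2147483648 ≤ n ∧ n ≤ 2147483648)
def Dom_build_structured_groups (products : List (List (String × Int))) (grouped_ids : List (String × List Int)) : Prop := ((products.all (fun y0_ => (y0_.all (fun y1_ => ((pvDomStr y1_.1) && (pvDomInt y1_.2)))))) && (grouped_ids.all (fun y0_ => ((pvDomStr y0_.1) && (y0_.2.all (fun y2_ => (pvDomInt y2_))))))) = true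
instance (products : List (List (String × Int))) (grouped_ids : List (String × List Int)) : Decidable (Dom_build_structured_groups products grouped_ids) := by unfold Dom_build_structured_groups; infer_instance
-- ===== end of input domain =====

-- B replaces A's id→product index, mutable set objects and per-id pull loop by one product-major
-- set comprehension per label/field, sorted directly: a simpler decomposition, not claimed faster.


-- ===== PORT A =====
def build_structured_groups (products : List (List (String × Int))) (grouped_ids : List (String × List Int)) : List (String × List (String × List Int)) :=
  -- id_to_product = {p["id"]: p for p in products}; p["id"] raises KeyError when absent —
  -- Pre_ guarantees presence, so the `.getD 0` default is never taken on admitted inputs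
  let id_to_product : PySem.Dict Int (List (String × Int)) :=
    products.foldl (fun d p => d.insert (((PySem.Dict.mk p).get? "id").getD 0) p) PySem.Dict.empty
  let structured_output : PySem.Dict String (List (String × List Int)) :=
    grouped_ids.foldl (fun out li =>
      let sets := li.2.foldl
        (fun (s : PySem.Set Int × PySem.Set Int × PySem.Set Int) pid =>
          match id_to_product.get? pid with
          | none => s                         -- .get(pid) returned None: `if not product: continue`
          | some product =>
            if product.isEmpty then s         -- an empty dict is falsy too
            else
              (match (PySem.Dict.mk product).get? "row" with
               | some v => PySem.Set.add s.1 v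
               | none => s.1,
               match (PySem.Dict.mk product).get? "col" with
               | some v => PySem.Set.add s.2.1 v
               | none => s.2.1,
               match (PySem.Dict.mk product).get? "subrow" with
               | some v => PySem.Set.add s.2.2 v
               | none => s.2.2))
        (PySem.Set.empty, PySem.Set.empty, PySem.Set.empty)
      out.insert li.1
        [("ids", li.2),
         ("row", PySem.List.sorted sets.1 (fun x => x)),
         ("col", PySem.List.sorted sets.2.1 (fun x => x)),
         ("subrow", PySem.List.sorted sets.2.2 (fun x => x))])
      PySem.Dict.empty
  structured_output.items

-- ===== PORT B =====
-- gather(ids, field) = sorted({p[field] for p in products if p["id"] in ids and field in p})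
def pvGather (products : List (List (String × Int))) (ids : List Int) (field : String) : List Int :=
  PySem.List.sorted
    (PySem.Set.ofList (products.filterMap (fun p =>
      if ids.contains (((PySem.Dict.mk p).get? "id").getD 0) then (PySem.Dict.mk p).get? field
      else none)))
    (fun x => x)

def build_structured_groups_alt (products : List (List (String × Int))) (grouped_ids : List (String × List Int)) : List (String × List (String × List Int)) :=
  -- {label: {"ids": ids, "row": gather(...), ...} for label, ids in grouped_ids.items()}
  (grouped_ids.foldl (fun out li =>
      out.insert li.1
        [("ids", li.2),
         ("row", pvGather products li.2 "row"),
         ("col", pvGather products li.2 "col"),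
         ("subrow", pvGather products li.2 "subrow")])
    PySem.Dict.empty).items

-- ===== PRECONDITION & SPEC =====
-- Pre_ excludes products missing an "id" key (there A raises KeyError, and so does B) and
-- products that share an id value while disagreeing on a row/col/subrow entry: a duplicate-key
-- corner no caller specifies, where A keeps the last duplicate's metadata and B merges all
-- duplicates — both readings are defensible, so neither value is claimed.
def Pre_build_structured_groups (products : List (List (String × Int))) (grouped_ids : List (String × List Int)) : Prop :=
  (∀ p ∈ products, ((PySem.Dict.mk p).get? "id").isSome = true) ∧
  (∀ p ∈ products, ∀ q ∈ products,
    ((PySem.Dict.mk p).get? "id").getD 0 = ((PySem.Dict.mk q).get? "id").getD 0 →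
    (PySem.Dict.mk p).get? "row" = (PySem.Dict.mk q).get? "row" ∧
    (PySem.Dict.mk p).get? "col" = (PySem.Dict.mk q).get? "col" ∧
    (PySem.Dict.mk p).get? "subrow" = (PySem.Dict.mk q).get? "subrow")
instance (products : List (List (String × Int))) (grouped_ids : List (String × List Int)) : Decidable (Pre_build_structured_groups products grouped_ids) := by unfold Pre_build_structured_groups; infer_instance

def pvWitness_build_structured_groups : (List (List (String × Int))) × (List (String × List Int)) :=
  ([[("id", 1), ("row", 2), ("col", 3)], [("id", 2), ("subrow", 4)]], [("a", [1, 2]), ("b", [])])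

def Spec_build_structured_groups (products : List (List (String × Int))) (grouped_ids : List (String × List Int)) (out : List (String × List (String × List Int))) : Prop := out = build_structured_groups_alt products grouped_ids
instance (products : List (List (String × Int))) (grouped_ids : List (String × List Int)) (out : List (String × List (String × List Int))) : Decidable (Spec_build_structured_groups products grouped_ids out) := by unfold Spec_build_structured_groups; infer_instance

-- ===== CLAIM (what is proved, stated in full; the proofs are below) =====
def Claim_equal_build_structured_groups : Prop := ∀ (products : List (List (String × Int))) (grouped_ids : List (String × List Int)), Dom_build_structured_groups products grouped_ids → Pre_build_structured_groups products grouped_ids → Spec_build_structured_groups products grouped_ids (build_structured_groups products grouped_ids)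

-- ===== LEMMAS AND PROOFS =====

-- the id a product is indexed under
def pvKey (p : List (String × Int)) : Int := ((PySem.Dict.mk p).get? "id").getD 0

-- one step of A's inner loop, restricted to a single metadata field
def pvStep (idp : PySem.Dict Int (List (String × Int))) (field : String)
    (s : PySem.Set Int) (pid : Int) : PySem.Set Int :=
  match idp.get? pid with
  | none => s
  | some product =>
    if product.isEmpty then s
    else
      match (PySem.Dict.mk product).get? field with
      | some v => PySem.Set.add s v
      | none => s

theorem pvStep_mem (idp : PySem.Dict Int (List (String × Int))) (field : String)
    (s : PySem.Set Int) (pid x : Int) :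
    x ∈ pvStep idp field s pid ↔
      x ∈ s ∨ ∃ q, idp.get? pid = some q ∧ q.isEmpty = false ∧
        (PySem.Dict.mk q).get? field = some x := by
  unfold pvStep
  split
  · rename_i hnone
    simp [hnone]
  · rename_i q hq
    split
    · rename_i he
      simp only [hq, Option.some.injEq]
      constructor
      · exact Or.inl
      · rintro (hx | ⟨q', rfl, he', -⟩)
        · exact hx
        · rw [he] at he'; cases he'
    · rename_i he
      split
      · rename_i v hv
        rw [PySem.Set.mem_add]
        constructor
        · rintro (hx | rfl)
          · exact Or.inl hx
          · exact Or.inr ⟨q, hq, Bool.eq_false_iff.2 he, hv⟩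
        · rintro (hx | ⟨q', hq', -, hv'⟩)
          · exact Or.inl hx
          · rw [hq] at hq'; cases hq'
            rw [hv] at hv'; cases hv'
            exact Or.inr rfl
      · rename_i hv
        constructor
        · exact Or.inl
        · rintro (hx | ⟨q', hq', -, hv'⟩)
          · exact hx
          · rw [hq] at hq'; cases hq'
            rw [hv] at hv'; simp at hv'

theorem pvStep_nodup (idp : PySem.Dict Int (List (String × Int))) (field : String)
    (s : PySem.Set Int) (pid : Int) (hs : s.Nodup) : (pvStep idp field s pid).Nodup := by
  unfold pvStep
  split
  · exact hs
  · split
    · exact hs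
    · split
      · exact PySem.Set.nodup_add _ _ hs
      · exact hs

-- A's three-set inner fold is three independent single-field folds
theorem pvSplit (idp : PySem.Dict Int (List (String × Int))) (ids : List Int)
    (s : PySem.Set Int × PySem.Set Int × PySem.Set Int) :
    ids.foldl
      (fun (s : PySem.Set Int × PySem.Set Int × PySem.Set Int) pid =>
        match idp.get? pid with
        | none => s
        | some product =>
          if product.isEmpty then s
          else
            (match (PySem.Dict.mk product).get? "row" with
             | some v => PySem.Set.add s.1 v
             | none => s.1,
             match (PySem.Dict.mk product).get? "col" with
             | some v => PySem.Set.add s.2.1 v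
             | none => s.2.1,
             match (PySem.Dict.mk product).get? "subrow" with
             | some v => PySem.Set.add s.2.2 v
             | none => s.2.2)) s
      = (ids.foldl (pvStep idp "row") s.1,
         ids.foldl (pvStep idp "col") s.2.1,
         ids.foldl (pvStep idp "subrow") s.2.2) := by
  induction ids generalizing s with
  | nil => rfl
  | cons pid rest ih =>
    simp only [List.foldl_cons]
    rw [ih]
    have hstep : ∀ (t : PySem.Set Int × PySem.Set Int × PySem.Set Int),
        (match idp.get? pid with
         | none => t
         | some product =>
           if product.isEmpty then t
           else
             (match (PySem.Dict.mk product).get? "row" with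
              | some v => PySem.Set.add t.1 v
              | none => t.1,
              match (PySem.Dict.mk product).get? "col" with
              | some v => PySem.Set.add t.2.1 v
              | none => t.2.1,
              match (PySem.Dict.mk product).get? "subrow" with
              | some v => PySem.Set.add t.2.2 v
              | none => t.2.2))
        = (pvStep idp "row" t.1 pid, pvStep idp "col" t.2.1 pid, pvStep idp "subrow" t.2.2 pid) := by
      intro t
      unfold pvStep
      split
      · rfl
      · rename_i q hq
        split
        · rfl
        · rfl
    rw [hstep]

theorem pvMemFoldlStep (idp : PySem.Dict Int (List (String × Int))) (field : String)
    (ids : List Int) (s : PySem.Set Int) (x : Int) :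
    x ∈ ids.foldl (pvStep idp field) s ↔
      x ∈ s ∨ ∃ pid ∈ ids, ∃ q, idp.get? pid = some q ∧ q.isEmpty = false ∧
        (PySem.Dict.mk q).get? field = some x := by
  induction ids generalizing s with
  | nil => simp
  | cons pid rest ih =>
    simp only [List.foldl_cons, ih, pvStep_mem, List.mem_cons]
    constructor
    · rintro ((hx | ⟨q, hq, he, hf⟩) | ⟨pid', hmem, q, hq, he, hf⟩)
      · exact Or.inl hx
      · exact Or.inr ⟨pid, Or.inl rfl, q, hq, he, hf⟩
      · exact Or.inr ⟨pid', Or.inr hmem, q, hq, he, hf⟩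
    · rintro (hx | ⟨pid', rfl | hmem, q, hq, he, hf⟩)
      · exact Or.inl (Or.inl hx)
      · exact Or.inl (Or.inr ⟨q, hq, he, hf⟩)
      · exact Or.inr ⟨pid', hmem, q, hq, he, hf⟩

theorem pvNodupFoldlStep (idp : PySem.Dict Int (List (String × Int))) (field : String)
    (ids : List Int) (s : PySem.Set Int) (hs : s.Nodup) :
    (ids.foldl (pvStep idp field) s).Nodup := by
  induction ids generalizing s with
  | nil => exact hs
  | cons pid rest ih => exact ih _ (pvStep_nodup _ _ _ _ hs)

-- A's id_to_product maps pid to some product of that id (the last inserted one)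
theorem pvIdpMem (products : List (List (String × Int))) (pid : Int) (q : List (String × Int))
    (h : (products.foldl (fun d p => d.insert (((PySem.Dict.mk p).get? "id").getD 0) p)
        PySem.Dict.empty).get? pid = some q) : q ∈ products ∧ pvKey q = pid := by
  induction products using List.reverseRecOn with
  | nil => simp [PySem.Dict.get?_empty] at h
  | append_singleton l p ih =>
    rw [List.foldl_append, List.foldl_cons, List.foldl_nil, PySem.Dict.get?_insert] at h
    split at h
    · rename_i hk
      cases h
      exact ⟨List.mem_append_right _ (List.mem_singleton_self _), hk.symm⟩
    · obtain ⟨hm, hk⟩ := ih h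
      exact ⟨List.mem_append_left _ hm, hk⟩

-- every product's id is found in id_to_product
theorem pvIdpSome (products : List (List (String × Int))) (p : List (String × Int))
    (hp : p ∈ products) :
    ((products.foldl (fun d p => d.insert (((PySem.Dict.mk p).get? "id").getD 0) p)
        PySem.Dict.empty).get? (pvKey p)).isSome = true := by
  induction products using List.reverseRecOn with
  | nil => cases hp
  | append_singleton l r ih =>
    rw [List.foldl_append, List.foldl_cons, List.foldl_nil, PySem.Dict.get?_insert]
    split
    · rfl
    · rename_i hne
      rcases List.mem_append.1 hp with hl | hr
      · exact ih hl
      · rw [List.mem_singleton.1 hr] at hne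
        exact absurd rfl hne

-- a product that has an "id" key is not the empty dict
theorem pvNotEmpty (p : List (String × Int)) (h : ((PySem.Dict.mk p).get? "id").isSome = true) :
    p.isEmpty = false := by
  cases p with
  | nil => simp [PySem.Dict.get?] at h
  | cons a t => rfl

-- per label and field, A's pulled set sorts to B's comprehension
theorem pvGatherEq (products : List (List (String × Int)))
    (hid : ∀ p ∈ products, ((PySem.Dict.mk p).get? "id").isSome = true)
    (ids : List Int) (field : String)
    (hfe : ∀ p ∈ products, ∀ q ∈ products, pvKey p = pvKey q →
      (PySem.Dict.mk p).get? field = (PySem.Dict.mk q).get? field) :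
    PySem.List.sorted
      (ids.foldl (pvStep (products.foldl
        (fun d p => d.insert (((PySem.Dict.mk p).get? "id").getD 0) p) PySem.Dict.empty) field)
        PySem.Set.empty) (fun x => x)
      = pvGather products ids field := by
  unfold pvGather
  apply PySem.List.sorted_eq_sorted_of_perm _ _ _ (fun _ _ h => h)
  refine (List.perm_ext_iff_of_nodup
    (pvNodupFoldlStep _ _ _ _ List.nodup_nil) (PySem.Set.nodup_ofList _)).mpr ?_
  intro x
  rw [pvMemFoldlStep, PySem.Set.mem_ofList _ _, List.mem_filterMap]
  constructor
  · rintro (hx | ⟨pid, hpid, q, hq, -, hf⟩)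
    · simp at hx
    · obtain ⟨hqmem, hkey⟩ := pvIdpMem products pid q hq
      refine ⟨q, hqmem, ?_⟩
      rw [if_pos ?_]
      · exact hf
      · rw [show ((PySem.Dict.mk q).get? "id").getD 0 = pvKey q from rfl, hkey]
        exact List.contains_iff_mem.2 hpid
  · rintro ⟨p, hp, hcond⟩
    split at hcond
    · rename_i hin
      obtain ⟨q, hq⟩ := Option.isSome_iff_exists.1 (pvIdpSome products p hp)
      obtain ⟨hqmem, hqkey⟩ := pvIdpMem products (pvKey p) q hq
      refine Or.inr ⟨pvKey p, List.contains_iff_mem.1 hin, q, hq,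
        pvNotEmpty q (hid q hqmem), ?_⟩
      rw [hfe q hqmem p hp hqkey]
      exact hcond
    · exact absurd hcond (by simp)

-- ===== VERDICT (by name: the statement is the Claim_ definition above) =====
theorem build_structured_groups_spec : Claim_equal_build_structured_groups := by
  intro products grouped_ids _ hpre
  obtain ⟨hid, hagree⟩ := hpre
  unfold Spec_build_structured_groups
  simp only [build_structured_groups, build_structured_groups_alt]
  congr 1
  refine PySem.List.foldl_congr_mem _ _ _ _ ?_
  intro out li _
  congr 1
  rw [pvSplit]
  simp only [pvGatherEq products hid li.2 "row"
      (fun p hp q hq hk => ((hagree p hp q hq hk).1)),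
    pvGatherEq products hid li.2 "col"
      (fun p hp q hq hk => ((hagree p hp q hq hk).2.1)),
    pvGatherEq products hid li.2 "subrow"
      (fun p hp q hq hk => ((hagree p hp q hq hk).2.2))]
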